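-- pv_equiv track=rewrite | github.com/jasminextan/markdown_compiler | markdown_compiler.py | compile_code_inline
-- ===== SOURCE A (Python) =====
-- def compile_code_inline(line):
--     '''
--     Add <code> tags.
--
--     HINT:
--     This function is like the italics functions because inline code uses only a single character as a delimiter.
--     It is more complex, however, because inline code blocks can contain valid HTML inside of them,
--     but we do not want that HTML to get rendered as HTML.
--     Therefore, we must convert the `<` and `>` signs into `&lt;` and `&gt;` respectively.
--
--     >>> compile_code_inline('You can use backticks like this (`1+2`) to include code in the middle of text.')
--     'You can use backticks like this (<code>1+2</code>) to include code in the middle of text.'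
--     >>> compile_code_inline('This is inline code: `1+2`')
--     'This is inline code: <code>1+2</code>'
--     >>> compile_code_inline('`1+2`')
--     '<code>1+2</code>'
--     >>> compile_code_inline('This example has html within the code: `<b>bold!</b>`')
--     'This example has html within the code: <code>&lt;b&gt;bold!&lt;/b&gt;</code>'
--     >>> compile_code_inline('this example has a math formula in the  code: `1 + 2 < 4`')
--     'this example has a math formula in the  code: <code>1 + 2 &lt; 4</code>'
--     >>> compile_code_inline('this example has a <b>math formula</b> in the  code: `1 + 2 < 4`')
--     'this example has a <b>math formula</b> in the  code: <code>1 + 2 &lt; 4</code>'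
--     >>> compile_code_inline('```')
--     '```'
--     >>> compile_code_inline('```python3')
--     '```python3'
--     '''
--     secondstar = False
--     firststar = False
--     starcheck = False
--     linetwo = ''
--     linethree = '<code>'
--     linefour = '</code>'
--     for c in line:
--         if c == '`':
--             starcheck = True
--         if firststar == True and starcheck == True:
--             linetwo += linefour
--             secondstar = True
--             firststar = False
--         elif firststar == False and starcheck == True:
--             linetwo += linethree
--             firststar = True
--             secondstar = False
--         elif c == '<' and firststar == True and secondstar == False:
--             linetwo += '&lt;'
--         elif c == '>' and firststar == True and secondstar == False:
--             linetwo += '&gt;'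
--         elif c!= '`':
--             linetwo += c
--         starcheck = False
--     if secondstar == False:
--         return (line)
--     return(linetwo)
-- ===== SOURCE B (Python) =====
-- def compile_code_inline(line):
--     if line.count('`') % 2 == 1:
--         return line
--     parts = line.split('`')
--     pieces = []
--     for i, seg in enumerate(parts):
--         if i % 2 == 1:
--             pieces.append('<code>' + seg.replace('<', '&lt;').replace('>', '&gt;') + '</code>')
--         else:
--             pieces.append(seg)
--     return ''.join(pieces)
-- ===== Notes on version B (the rewrite author's own statement) =====
-- stated objective: simpler
-- what changed: Replaced A's per-character firststar/secondstar/starcheck state machine with a count-parity check plus split-on-backtick and a parity map over the segments (odd segments wrapped in <code> with < and > escaped via str.replace).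
import Mathlib
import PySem

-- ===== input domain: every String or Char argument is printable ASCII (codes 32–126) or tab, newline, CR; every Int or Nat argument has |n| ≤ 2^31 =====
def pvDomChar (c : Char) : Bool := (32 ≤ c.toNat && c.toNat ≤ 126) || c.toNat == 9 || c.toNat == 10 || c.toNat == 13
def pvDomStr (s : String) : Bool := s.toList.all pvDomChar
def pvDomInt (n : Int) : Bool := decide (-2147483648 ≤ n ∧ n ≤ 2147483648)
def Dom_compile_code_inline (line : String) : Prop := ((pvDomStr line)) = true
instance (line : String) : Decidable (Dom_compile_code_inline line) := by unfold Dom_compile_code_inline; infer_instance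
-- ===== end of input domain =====

-- B replaces A's per-character firststar/secondstar state machine by a split-on-'`'
-- and parity-map rebuild (objective: simpler); same return value everywhere.

-- ===== PORT A =====
-- one loop iteration of A (state = (secondstar, firststar, starcheck, linetwo))
def pvStepA (st : Bool × Bool × Bool × List Char) (c : Char) : Bool × Bool × Bool × List Char :=
  let secondstar := st.1
  let firststar := st.2.1
  let starcheck := st.2.2.1
  let linetwo := st.2.2.2
  let starcheck := if c == '`' then true else starcheck
  let res :=
    if firststar && starcheck then (true, false, linetwo ++ "</code>".toList)
    else if !firststar && starcheck then (false, true, linetwo ++ "<code>".toList)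
    else if c == '<' && firststar && !secondstar then (secondstar, firststar, linetwo ++ "&lt;".toList)
    else if c == '>' && firststar && !secondstar then (secondstar, firststar, linetwo ++ "&gt;".toList)
    else if c != '`' then (secondstar, firststar, linetwo ++ [c])
    else (secondstar, firststar, linetwo)
  (res.1, res.2.1, false, res.2.2)

def compile_code_inline (line : String) : String :=
  let st := line.toList.foldl pvStepA (false, false, false, [])
  if st.1 then String.ofList st.2.2.2 else line

-- ===== PORT B =====
def compile_code_inline_alt (line : String) : String :=
  if PySem.Str.count line "`" % 2 == 1 then line
  else
    let parts := (PySem.Str.split? line "`").getD []   -- sep "`" is nonempty, so split? is always `some` here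
    let pieces := (PySem.List.enumerate parts).map (fun p =>
      if PySem.Int.mod p.1 2 == 1 then
        "<code>" ++ PySem.Str.replace (PySem.Str.replace p.2 "<" "&lt;") ">" "&gt;" ++ "</code>"
      else p.2)
    PySem.Str.join "" pieces

-- ===== PRECONDITION & SPEC =====
def Spec_compile_code_inline (line : String) (out : String) : Prop := out = compile_code_inline_alt line
instance (line : String) (out : String) : Decidable (Spec_compile_code_inline line out) := by unfold Spec_compile_code_inline; infer_instance

-- ===== CLAIM (what is proved, stated in full; the proofs are below) =====
def Claim_equal_compile_code_inline : Prop := ∀ (line : String), Dom_compile_code_inline line → Spec_compile_code_inline line (compile_code_inline line)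

-- ===== LEMMAS AND PROOFS =====

-- escape of one character inside a code span
def pvEsc (c : Char) : List Char :=
  if c == '<' then "&lt;".toList else if c == '>' then "&gt;".toList else [c]

-- the common spine: emit tags at backticks, escape only inside a span
def pvG : List Char → Bool → List Char
  | [], _ => []
  | c :: cs, b =>
    if c == '`' then (if b then "</code>".toList else "<code>".toList) ++ pvG cs (!b)
    else (if b then pvEsc c else [c]) ++ pvG cs b

-- split on '`' (specification of PySem.Chars.splitOn with separator ['`'])
def pvSp : List Char → List (List Char)
  | [] => [[]]
  | c :: cs =>
    if c == '`' then [] :: pvSp cs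
    else
      match pvSp cs with
      | [] => [[c]]
      | p :: ps => (c :: p) :: ps

-- B's rebuild of the segments, alternating verbatim / wrapped-escaped
def pvRebuild : List (List Char) → Bool → List Char
  | [], _ => []
  | p :: ps, b =>
    (if b then "<code>".toList ++ p.flatMap pvEsc ++ "</code>".toList else p) ++ pvRebuild ps (!b)

-- A's loop, characterised: linetwo accumulates pvG, firststar is the backtick parity,
-- secondstar says "some backtick was seen and the last one closed a span"
theorem pvA_loop (cs : List Char) : ∀ (s f : Bool) (acc : List Char), (f = true → s = false) →
    cs.foldl pvStepA (s, f, false, acc) =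
      ((if cs.count '`' = 0 then s else !(f ^^ decide (cs.count '`' % 2 = 1))),
       f ^^ decide (cs.count '`' % 2 = 1), false, acc ++ pvG cs f) := by
  induction cs with
  | nil => intro s f acc _; simp [pvG]
  | cons c t ih =>
    intro s f acc h
    rw [List.foldl_cons]
    have hcnt : (c :: t).count '`' = t.count '`' + (if c = '`' then 1 else 0) := by
      simp [List.count_cons]
    by_cases hc : c = '`'
    · subst hc
      rw [hcnt]
      cases f with
      | true =>
        have hs : s = false := h rfl
        subst hs
        have hstep : pvStepA (false, true, false, acc) '`' = (true, false, false, acc ++ "</code>".toList) := by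
          simp [pvStepA]
        rw [hstep, ih true false _ (by simp)]
        simp only [pvG, BEq.rfl, if_pos, Bool.not_true, Bool.true_xor, Bool.false_xor]
        refine Prod.ext ?_ (Prod.ext ?_ (Prod.ext rfl ?_))
        · by_cases h0 : t.count '`' % 2 = 1
          · simp [h0]; constructor <;> intro hh <;> omega
          · have h1 : (t.count '`' + 1) % 2 = 1 := by omega
            by_cases hz : t.count '`' = 0 <;> simp [h0, h1, hz]
        · by_cases h0 : t.count '`' % 2 = 1
          · have h1 : (t.count '`' + 1) % 2 = 0 := by omega
            simp [h0, h1]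
          · have h1 : (t.count '`' + 1) % 2 = 1 := by omega
            simp [h0, h1]
        · simp [List.append_assoc]
      | false =>
        have hstep : pvStepA (s, false, false, acc) '`' = (false, true, false, acc ++ "<code>".toList) := by
          simp [pvStepA]
        rw [hstep, ih false true _ (by simp)]
        simp only [pvG, BEq.rfl, if_pos, Bool.not_false, Bool.false_xor, Bool.true_xor]
        refine Prod.ext ?_ (Prod.ext ?_ (Prod.ext rfl ?_))
        · by_cases h0 : t.count '`' % 2 = 1
          · have h1 : (t.count '`' + 1) % 2 = 0 := by omega
            by_cases hz : t.count '`' = 0 <;> simp [h0, h1, hz] <;> omega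
          · have h1 : (t.count '`' + 1) % 2 = 1 := by omega
            by_cases hz : t.count '`' = 0 <;> simp [h0, h1, hz]
        · by_cases h0 : t.count '`' % 2 = 1
          · have h1 : (t.count '`' + 1) % 2 = 0 := by omega
            simp [h0, h1]
          · have h1 : (t.count '`' + 1) % 2 = 1 := by omega
            simp [h0, h1]
        · simp [List.append_assoc]
    · have hc' : (c == '`') = false := by simp [hc]
      rw [hcnt]
      simp only [hc, if_false, Nat.add_zero]
      cases f with
      | true =>
        have hs : s = false := h rfl
        subst hs
        have hstep : pvStepA (false, true, false, acc) c = (false, true, false, acc ++ pvEsc c) := by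
          by_cases h1 : c = '<'
          · subst h1; simp [pvStepA, pvEsc]
          · by_cases h2 : c = '>'
            · subst h2; simp [pvStepA, pvEsc]
            · simp [pvStepA, pvEsc, h1, h2, hc, hc']
        rw [hstep, ih false true _ (by simp)]
        simp only [pvG, hc', Bool.false_eq_true, if_false, if_true]
        simp [List.append_assoc]
      | false =>
        rw [show pvStepA (s, false, false, acc) c = (s, false, false, acc ++ [c]) from by
          simp [pvStepA, hc, hc']]
        rw [ih s false _ (by simp)]
        simp only [pvG, hc', Bool.false_eq_true, if_false]
        simp [List.append_assoc]

theorem pvCount_go (c : Char) : ∀ (cs : List Char) (fuel acc : Nat), cs.length ≤ fuel →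
    PySem.Chars.count.go [c] fuel cs acc = acc + cs.count c := by
  intro cs
  induction cs with
  | nil => intro fuel acc _; cases fuel <;> simp [PySem.Chars.count.go]
  | cons a t ih =>
    intro fuel acc hle
    cases fuel with
    | zero => simp at hle
    | succ fu =>
      rw [PySem.Chars.count.go]
      by_cases h : a = c
      · subst h
        simp only [List.isPrefixOf, BEq.rfl, Bool.and_self, if_pos]
        simp only [List.length_cons] at hle
        rw [show ([a].length) = 1 from rfl]
        simp only [List.drop_succ_cons, List.drop_zero]
        rw [ih fu (acc + 1) (by omega)]
        simp [List.count_cons]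
        omega
      · have hp : ([c].isPrefixOf (a :: t)) = false := by
          simp [List.isPrefixOf]; exact fun hh => absurd hh.symm h
        rw [hp]
        simp only [Bool.false_eq_true, if_false]
        rw [ih fu acc (by simpa using Nat.le_of_succ_le_succ hle)]
        simp [h]

theorem pvCount_char (cs : List Char) (c : Char) : PySem.Chars.count cs [c] = cs.count c := by
  rw [PySem.Chars.count]
  simp only [List.isEmpty_cons, Bool.false_eq_true, if_false]
  rw [pvCount_go c cs cs.length 0 le_rfl]
  simp

theorem pvSp_ne_nil (cs : List Char) : pvSp cs ≠ [] := by
  cases cs with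
  | nil => simp [pvSp]
  | cons c t =>
    simp only [pvSp]
    split
    · simp
    · split <;> simp

theorem pvSplit_go : ∀ (cs : List Char) (fuel : Nat) (cur : List Char) (acc : List (List Char)),
    cs.length < fuel →
    PySem.Chars.splitOn.go ['`'] fuel cs cur acc = acc.reverse ++ ((pvSp cs).modifyHead (cur.reverse ++ ·)) := by
  intro cs
  induction cs with
  | nil =>
    intro fuel cur acc h
    cases fuel with
    | zero => omega
    | succ fu =>
      rw [PySem.Chars.splitOn.go]
      · simp [pvSp]
      · omega
  | cons a t ih =>
    intro fuel cur acc h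
    cases fuel with
    | zero => omega
    | succ fu =>
      rw [PySem.Chars.splitOn.go]
      by_cases ha : a = '`'
      · subst ha
        simp only [List.isPrefixOf, BEq.rfl, Bool.and_self, if_pos]
        rw [show (['`'].length) = 1 from rfl]
        simp only [List.drop_succ_cons, List.drop_zero]
        rw [ih fu [] (cur.reverse :: acc) (by simp at h ⊢; omega)]
        simp only [pvSp, BEq.rfl, if_pos]
        cases hsp : pvSp t with
        | nil => exact absurd hsp (pvSp_ne_nil t)
        | cons p ps => simp
      · have hp : (['`'].isPrefixOf (a :: t)) = false := by
          simp [List.isPrefixOf]; exact fun hh => absurd hh.symm ha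
        rw [hp]
        simp only [Bool.false_eq_true, if_false]
        rw [ih fu (a :: cur) acc (by simp at h ⊢; omega)]
        have hne : (a == '`') = false := by simp [ha]
        simp only [pvSp, hne, Bool.false_eq_true, if_false]
        cases hsp : pvSp t with
        | nil => exact absurd hsp (pvSp_ne_nil t)
        | cons p ps => simp

theorem pvSplit (cs : List Char) : PySem.Chars.splitOn cs ['`'] = pvSp cs := by
  rw [PySem.Chars.splitOn]
  rw [pvSplit_go cs (cs.length + 1) [] [] (by omega)]
  cases hsp : pvSp cs with
  | nil => exact absurd hsp (pvSp_ne_nil cs)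
  | cons p ps => simp

theorem pvReplace_go (o : Char) (new : List Char) : ∀ (cs : List Char) (fuel : Nat) (acc : List Char),
    cs.length ≤ fuel →
    PySem.Chars.replace.go [o] new fuel cs acc =
      acc.reverse ++ cs.flatMap (fun c => if c == o then new else [c]) := by
  intro cs
  induction cs with
  | nil => intro fuel acc _; cases fuel <;> simp [PySem.Chars.replace.go]
  | cons a t ih =>
    intro fuel acc hle
    cases fuel with
    | zero => simp at hle
    | succ fu =>
      rw [PySem.Chars.replace.go]
      by_cases h : a = o
      · subst h
        simp only [List.isPrefixOf, BEq.rfl, Bool.and_self, if_pos]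
        rw [show ([a].length) = 1 from rfl]
        simp only [List.drop_succ_cons, List.drop_zero]
        rw [ih fu (new.reverse ++ acc) (by simp at hle; omega)]
        simp
      · have hp : ([o].isPrefixOf (a :: t)) = false := by
          simp [List.isPrefixOf]; exact fun hh => absurd hh.symm h
        rw [hp]
        simp only [Bool.false_eq_true, if_false]
        rw [ih fu (a :: acc) (by simp at hle ⊢; omega)]
        simp [h]

theorem pvReplace_char (cs : List Char) (o : Char) (new : List Char) :
    PySem.Chars.replace cs [o] new = cs.flatMap (fun c => if c == o then new else [c]) := by
  rw [PySem.Chars.replace]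
  simp only [List.isEmpty_cons, Bool.false_eq_true, if_false]
  rw [pvReplace_go o new cs cs.length [] le_rfl]
  simp

theorem pvEsc_replace (p : List Char) :
    PySem.Chars.replace (PySem.Chars.replace p "<".toList "&lt;".toList) ">".toList "&gt;".toList =
      p.flatMap pvEsc := by
  rw [show ("<".toList) = ['<'] from rfl, show (">".toList) = ['>'] from rfl]
  rw [pvReplace_char, pvReplace_char]
  induction p with
  | nil => simp
  | cons c t ih =>
    simp only [List.flatMap_cons, List.flatMap_append, ih]
    congr 1
    by_cases h1 : c = '<'
    · subst h1; decide
    · by_cases h2 : c = '>'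
      · subst h2; simp [pvEsc]
      · simp [pvEsc, h1, h2]

theorem pvJoin_nil_cons (p : List Char) (ps : List (List Char)) :
    PySem.Chars.join [] (p :: ps) = p ++ PySem.Chars.join [] ps := by
  simp [PySem.Chars.join, List.intercalate]
  cases ps <;> simp [List.intersperse]

theorem pvModFlip (i : Int) : (PySem.Int.mod (i + 1) 2 == 1) = !(PySem.Int.mod i 2 == 1) := by
  rw [PySem.Int.mod_eq_emod_of_pos (h := by norm_num), PySem.Int.mod_eq_emod_of_pos (h := by norm_num)]
  rcases Int.emod_two_eq i with h | h
  · have h2 : (i + 1) % 2 = 1 := by omega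
    simp [h, h2]
  · have h2 : (i + 1) % 2 = 0 := by omega
    simp [h, h2]

theorem pvRebuild_pvSp (cs : List Char) : ∀ (b : Bool),
    pvRebuild (pvSp cs) b =
      (if b then "<code>".toList else []) ++ pvG cs b ++
        (if b ^^ decide (cs.count '`' % 2 = 1) then "</code>".toList else []) := by
  induction cs with
  | nil => intro b; cases b <;> simp [pvSp, pvRebuild, pvG]
  | cons c t ih =>
    intro b
    by_cases hc : c = '`'
    · subst hc
      simp only [pvSp, pvG, BEq.rfl, if_pos]
      simp only [pvRebuild]
      rw [ih (!b)]
      have hcount : ((('`' :: t).count '`') % 2 = 1) ↔ ¬ (t.count '`' % 2 = 1) := by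
        simp [List.count_cons]; omega
      have hpar : decide ((('`' :: t).count '`') % 2 = 1) = !decide (t.count '`' % 2 = 1) := by
        by_cases h : t.count '`' % 2 = 1 <;> simp [hcount, h] <;> omega
      rw [hpar]
      cases b <;> cases hb2 : decide (t.count '`' % 2 = 1) <;> simp [pvRebuild]
    · have hc' : (c == '`') = false := by simp [hc]
      cases hsp : pvSp t with
      | nil => exact absurd hsp (pvSp_ne_nil t)
      | cons p ps =>
        simp only [pvSp, hc', Bool.false_eq_true, if_false, hsp]
        have iht := ih b
        rw [hsp] at iht
        simp only [pvRebuild] at iht ⊢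
        have hcnt : (c :: t).count '`' = t.count '`' := by simp [List.count_cons, hc]
        rw [hcnt]
        simp only [pvG, hc', Bool.false_eq_true, if_false]
        cases b with
        | false =>
          simp only [Bool.false_eq_true, if_false] at iht ⊢
          simp only [List.cons_append, iht]
          simp
        | true =>
          simp only [if_true, List.append_assoc, List.flatMap_cons] at iht ⊢
          have key := List.append_cancel_left iht
          rw [key]

theorem pvG_no_tick (cs : List Char) (h : cs.count '`' = 0) : pvG cs false = cs := by
  induction cs with
  | nil => simp [pvG]
  | cons c t ih =>
    rw [List.count_cons] at h
    have hc : (c == '`') = false := by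
      cases hb : (c == '`') <;> simp [hb] at h ⊢
    simp only [pvG, hc, Bool.false_eq_true, if_false]
    rw [ih (by omega)]
    simp

theorem pvB_pieces : ∀ (ps : List (List Char)) (i : Int),
    PySem.Chars.join []
      (((PySem.List.enumerate (ps.map String.ofList) i).map (fun p =>
          if PySem.Int.mod p.1 2 == 1 then
            "<code>" ++ PySem.Str.replace (PySem.Str.replace p.2 "<" "&lt;") ">" "&gt;" ++ "</code>"
          else p.2)).map String.toList) =
      pvRebuild ps (PySem.Int.mod i 2 == 1) := by
  intro ps
  induction ps with
  | nil => intro i; simp [PySem.List.enumerate_nil, pvRebuild, PySem.Chars.join, List.intercalate]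
  | cons p rest ih =>
    intro i
    rw [List.map_cons, PySem.List.enumerate_cons, List.map_cons, List.map_cons, pvJoin_nil_cons]
    rw [ih (i + 1), pvModFlip]
    simp only [pvRebuild]
    congr 1
    cases hm : (PySem.Int.mod i 2 == 1) with
    | false => simp
    | true =>
      simp only [if_pos]
      simp [PySem.Str.toList_replace]
      exact pvEsc_replace p

-- ===== VERDICT (by name: the statement is the Claim_ definition above) =====
theorem compile_code_inline_spec : Claim_equal_compile_code_inline := by
  unfold Claim_equal_compile_code_inline
  intro line _
  unfold Spec_compile_code_inline compile_code_inline compile_code_inline_alt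
  have hcount : PySem.Str.count line "`" = line.toList.count '`' := by
    rw [PySem.Str.count]; exact pvCount_char _ _
  rw [hcount]
  have hloop := pvA_loop line.toList false false [] (by simp)
  by_cases hodd : line.toList.count '`' % 2 = 1
  · have hne : line.toList.count '`' ≠ 0 := by omega
    simp only [hloop, hne, if_false, Bool.false_xor, hodd, decide_true, Bool.not_true]
    simp [hodd]
  · -- even number of backticks: both sides are the rebuilt string
    have hsplit : (PySem.Str.split? line "`").getD [] = (pvSp line.toList).map String.ofList := by
      rw [PySem.Str.split?, PySem.Chars.split?]
      simp [pvSplit]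
    have hmod : (line.toList.count '`' % 2 == 1) = false := by simp [hodd]
    simp only [hmod, Bool.false_eq_true, if_false, hsplit]
    rw [PySem.Str.join]
    rw [show ("".toList) = ([] : List Char) from rfl]
    rw [pvB_pieces (pvSp line.toList) 0]
    rw [show (PySem.Int.mod 0 2 == 1) = false from rfl]
    rw [pvRebuild_pvSp]
    simp only [hodd, decide_false, Bool.xor_false, Bool.false_eq_true, if_false]
    simp only [List.nil_append, List.append_nil]
    simp only [hloop]
    by_cases hz : line.toList.count '`' = 0
    · simp only [hz, if_pos, Bool.false_eq_true, if_false]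
      rw [pvG_no_tick _ hz]
      simp
    · simp only [hz, if_false, hodd]
      simp [hodd]
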